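-- pv_equiv track=rewrite | github.com/spicywagyu04/kosmos | src/kosmo/agent.py | _check_response_complete
-- ===== SOURCE A (Python) =====
-- from typing import Dict, List, Optional, Set, Tuple
--
-- def _check_response_complete(response: str) -> Tuple[bool, Optional[str]]:
--     """Check if the agent's response is complete or needs retry.
--
--     Args:
--         response: The agent's response string
--
--     Returns:
--         Tuple of (is_complete, retry_reason)
--     """
--     if not response or response == "No response generated.":
--         return False, "empty_response"
--
--     response_lower = response.lower()
--
--     # Check for explicit failure indicators
--     failure_phrases = [
--         "i was unable to",
--         "i couldn't complete",
--         "the tool failed",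
--         "error occurred",
--         "i apologize, but i cannot",
--     ]
--     for phrase in failure_phrases:
--         if phrase in response_lower:
--             return False, "tool_failure"
--
--     return True, None
-- ===== SOURCE B (Python) =====
-- def _check_response_complete(response):
--     """Single left-to-right scan: at each position test all failure phrases at once."""
--     if not response or response == "No response generated.":
--         return False, "empty_response"
--
--     lowered = response.lower()
--     failure_phrases = (
--         "i was unable to",
--         "i couldn't complete",
--         "the tool failed",
--         "error occurred",
--         "i apologize, but i cannot",
--     )
--     for i in range(len(lowered)):
--         if lowered.startswith(failure_phrases, i):
--             return False, "tool_failure"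
--
--     return True, None
-- ===== Notes on version B (the rewrite author's own statement) =====
-- stated objective: alternative
-- what changed: Replaces the per-phrase loop of five independent substring scans with a single left-to-right pass over the lowered text that tests all five phrases at each position (startswith with a tuple).
import Mathlib
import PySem

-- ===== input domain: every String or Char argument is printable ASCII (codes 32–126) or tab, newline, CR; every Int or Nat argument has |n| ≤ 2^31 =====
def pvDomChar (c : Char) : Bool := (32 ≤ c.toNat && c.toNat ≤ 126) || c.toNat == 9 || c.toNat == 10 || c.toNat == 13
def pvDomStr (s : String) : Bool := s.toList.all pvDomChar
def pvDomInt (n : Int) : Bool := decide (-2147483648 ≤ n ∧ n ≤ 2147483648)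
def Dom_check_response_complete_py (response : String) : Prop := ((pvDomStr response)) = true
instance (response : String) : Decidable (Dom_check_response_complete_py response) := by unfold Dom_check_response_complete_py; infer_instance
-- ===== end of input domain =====

-- B replaces A's five independent substring scans with one left-to-right pass testing all phrases at each position (alternative decomposition, same cost).


-- ===== PORT A =====
-- A: early-return loop over the phrase list, one substring scan per phrase.
def checkPhrasesA (lowered : String) : List String → Bool × Option String
  | [] => (true, none)
  | p :: rest =>
    if PySem.Str.isIn p lowered then (false, some "tool_failure")
    else checkPhrasesA lowered rest

def check_response_complete_py (response : String) : Bool × Option String :=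
  if response == "" || response == "No response generated." then (false, some "empty_response")
  else
    let response_lower := PySem.Str.lower response
    checkPhrasesA response_lower
      ["i was unable to", "i couldn't complete", "the tool failed",
       "error occurred", "i apologize, but i cannot"]

-- ===== PORT B =====
-- B: a single left-to-right scan; at each position all phrases are tested at once.
def scanB (phrases : List (List Char)) : List Char → Bool
  | [] => false
  | c :: rest =>
    phrases.any (fun p => PySem.Chars.startswith (c :: rest) p) || scanB phrases rest

def check_response_complete_py_alt (response : String) : Bool × Option String :=
  if response == "" || response == "No response generated." then (false, some "empty_response")
  else
    let lowered := PySem.Str.lower response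
    let phrases := ["i was unable to", "i couldn't complete", "the tool failed",
                    "error occurred", "i apologize, but i cannot"]
    if scanB (phrases.map String.toList) lowered.toList then (false, some "tool_failure")
    else (true, none)

-- ===== PRECONDITION & SPEC =====
def Spec_check_response_complete_py (response : String) (out : Bool × Option String) : Prop := out = check_response_complete_py_alt response
instance (response : String) (out : Bool × Option String) : Decidable (Spec_check_response_complete_py response out) := by unfold Spec_check_response_complete_py; infer_instance

-- ===== CLAIM (what is proved, stated in full; the proofs are below) =====
def Claim_equal_check_response_complete_py : Prop := ∀ (response : String), Dom_check_response_complete_py response → Spec_check_response_complete_py response (check_response_complete_py response)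

-- ===== LEMMAS AND PROOFS =====

-- B's single scan finds a match iff some phrase occurs as an infix (phrases nonempty).
lemma scanB_eq_any_isIn (phrases : List (List Char)) (h : ∀ p ∈ phrases, p ≠ []) :
    ∀ s : List Char, scanB phrases s = phrases.any (fun p => PySem.Chars.isIn p s) := by
  intro s
  induction s with
  | nil =>
    simp only [scanB]
    rw [eq_comm, List.any_eq_false]
    intro p hp
    rw [Bool.not_eq_true, PySem.Chars.isIn_eq_false_iff, List.infix_nil]
    exact h p hp
  | cons c rest ih =>
    simp only [scanB, ih]
    rw [Bool.eq_iff_iff]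
    simp only [Bool.or_eq_true, List.any_eq_true, PySem.Chars.startswith_iff,
      PySem.Chars.isIn_iff_infix, List.infix_cons_iff]
    constructor
    · rintro (⟨x, hx, h1⟩ | ⟨x, hx, h2⟩)
      exacts [⟨x, hx, Or.inl h1⟩, ⟨x, hx, Or.inr h2⟩]
    · rintro ⟨x, hx, h1 | h2⟩
      exacts [Or.inl ⟨x, hx, h1⟩, Or.inr ⟨x, hx, h2⟩]

-- A's early-return loop returns the same pair as "does any phrase occur?".
lemma checkPhrasesA_eq (lowered : String) :
    ∀ phrases : List String,
      checkPhrasesA lowered phrases =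
        (if phrases.any (fun p => PySem.Str.isIn p lowered) then (false, some "tool_failure")
         else (true, none)) := by
  intro phrases
  induction phrases with
  | nil => simp [checkPhrasesA]
  | cons p rest ih =>
    simp only [checkPhrasesA, ih, List.any_cons, Bool.or_eq_true, PySem.Str.isIn_eq,
      List.any_eq_true]
    by_cases hp : PySem.Chars.isIn p.toList lowered.toList = true
    · simp [hp]
    · simp [hp]

-- ===== VERDICT (by name: the statement is the Claim_ definition above) =====
theorem check_response_complete_py_spec : Claim_equal_check_response_complete_py := by
  intro response _
  unfold Spec_check_response_complete_py check_response_complete_py check_response_complete_py_alt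
  by_cases hg : (response == "" || response == "No response generated.") = true
  · simp [hg]
  · simp only [hg, Bool.false_eq_true, if_false]
    rw [checkPhrasesA_eq, scanB_eq_any_isIn _ (by decide)]
    simp
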